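-- pv_equiv track=rewrite | github.com/Pramod-Potti-Krishnan/text-labs | backend/services/text_box_generator.py | _generate_default_titles
-- ===== SOURCE A (Python) =====
-- from typing import List, Optional
--
-- def _generate_default_titles(
--
--     count: int,
--     existing: Optional[List[str]] = None
-- ) -> List[str]:
--     """Generate default titles for boxes."""
--     default_titles = [
--         "Overview", "Features", "Benefits", "Process",
--         "Details", "Summary"
--     ]
--
--     if existing:
--         titles = list(existing)
--     else:
--         titles = []
--
--     while len(titles) < count:
--         idx = len(titles) % len(default_titles)
--         titles.append(default_titles[idx])
--
--     return titles[:count]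
-- ===== SOURCE B (Python) =====
-- def _generate_default_titles(count, existing=None):
--     """Generate default titles for boxes: arithmetic block-fill decomposition instead of a per-element loop."""
--     default_titles = [
--         "Overview", "Features", "Benefits", "Process",
--         "Details", "Summary"
--     ]
--     result = list(existing) if existing else []
--     need = count - len(result)
--     if need > 0:
--         off = len(result) % 6
--         rotated = default_titles[off:] + default_titles[:off]
--         result += (rotated * (need // 6 + 1))[:need]
--     return result[:count]
-- ===== Notes on version B (the rewrite author's own statement) =====
-- stated objective: alternative
-- what changed: Replaces the per-element while-append loop with arithmetic: rotate the 6 defaults by len(existing)%6, repeat the rotated block enough times, and slice off exactly the shortfall in one step.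
import Mathlib
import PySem

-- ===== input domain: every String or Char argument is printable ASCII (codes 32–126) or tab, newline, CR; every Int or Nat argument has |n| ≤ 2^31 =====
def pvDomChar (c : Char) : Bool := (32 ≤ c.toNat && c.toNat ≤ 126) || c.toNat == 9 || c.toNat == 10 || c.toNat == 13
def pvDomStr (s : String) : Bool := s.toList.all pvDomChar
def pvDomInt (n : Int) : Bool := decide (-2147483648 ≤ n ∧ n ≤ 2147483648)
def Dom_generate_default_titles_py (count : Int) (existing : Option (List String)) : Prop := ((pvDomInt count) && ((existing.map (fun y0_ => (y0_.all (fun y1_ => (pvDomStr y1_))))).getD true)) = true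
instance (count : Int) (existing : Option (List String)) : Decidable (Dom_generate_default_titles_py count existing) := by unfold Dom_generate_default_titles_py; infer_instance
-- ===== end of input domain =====

-- B replaces A's per-element while-append loop by arithmetic: rotate the 6 defaults, repeat the block, slice the shortfall (objective: alternative decomposition).

-- the shared constant list of default titles (data only, used by both ports)
def pvDefaults : List String :=
  ["Overview", "Features", "Benefits", "Process", "Details", "Summary"]

-- ===== PORT A =====
-- the `while len(titles) < count` loop of A, appending default_titles[len(titles) % 6] each step
def genTitlesLoopA (count : Int) (titles : List String) : List String :=
  if (titles.length : Int) < count then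
    genTitlesLoopA count
      (titles ++ [PySem.List.pyGetD pvDefaults
        (PySem.Int.mod (titles.length : Int) (pvDefaults.length : Int)) ""])
  else titles
termination_by (count - titles.length).toNat
decreasing_by simp_all; omega

def generate_default_titles_py (count : Int) (existing : Option (List String)) : List String :=
  let titles := match existing with
    | some l => if l = [] then [] else l   -- `if existing:` truthiness
    | none => []
  PySem.List.slice (genTitlesLoopA count titles) none (some count)   -- titles[:count]

-- ===== PORT B =====
def generate_default_titles_py_alt (count : Int) (existing : Option (List String)) : List String :=
  let result := match existing with
    | some l => if l = [] then [] else l   -- `if existing:` truthiness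
    | none => []
  let need := count - (result.length : Int)
  let result2 :=
    if 0 < need then
      let off := PySem.Int.mod (result.length : Int) 6
      let rotated := PySem.List.slice pvDefaults (some off) none
                       ++ PySem.List.slice pvDefaults none (some off)
      result ++ PySem.List.slice
        ((List.replicate (PySem.Int.floordiv need 6 + 1).toNat rotated).flatten)
        none (some need)
    else result
  PySem.List.slice result2 none (some count)   -- result[:count]

-- ===== PRECONDITION & SPEC =====
def Spec_generate_default_titles_py (count : Int) (existing : Option (List String)) (out : List String) : Prop := out = generate_default_titles_py_alt count existing
instance (count : Int) (existing : Option (List String)) (out : List String) : Decidable (Spec_generate_default_titles_py count existing out) := by unfold Spec_generate_default_titles_py; infer_instance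

-- ===== CLAIM (what is proved, stated in full; the proofs are below) =====
def Claim_equal_generate_default_titles_py : Prop := ∀ (count : Int) (existing : Option (List String)), Dom_generate_default_titles_py count existing → Spec_generate_default_titles_py count existing (generate_default_titles_py count existing)

-- ===== LEMMAS AND PROOFS =====

-- pvG m p = the m default titles appended starting at cyclic position p
def pvG (m p : Nat) : List String :=
  (List.range m).map (fun i => pvDefaults.getD ((p + i) % 6) "")

theorem pvG_succ (m p : Nat) :
    pvG (m + 1) p = pvDefaults.getD (p % 6) "" :: pvG m (p + 1) := by
  simp only [pvG, List.range_succ_eq_map, List.map_cons, List.map_map]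
  refine congrArg₂ _ (by simp) ?_
  refine List.map_congr_left (fun i _ => ?_)
  simp only [Function.comp]
  congr 2
  omega

theorem loopA_eq (count : Int) (titles : List String) :
    genTitlesLoopA count titles = titles ++ pvG (count - titles.length).toNat titles.length := by
  generalize hN : (count - (titles.length : Int)).toNat = N
  induction N generalizing titles with
  | zero =>
      rw [genTitlesLoopA, if_neg (by omega)]
      simp [pvG]
  | succ N ih =>
      have hlt : (titles.length : Int) < count := by omega
      rw [genTitlesLoopA, if_pos hlt,
        ih (titles ++ [PySem.List.pyGetD pvDefaults
          (PySem.Int.mod (titles.length : Int) (pvDefaults.length : Int)) ""]) (by simp; omega)]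
      have h2 : PySem.List.pyGetD pvDefaults
          (PySem.Int.mod (titles.length : Int) (pvDefaults.length : Int)) ""
          = pvDefaults.getD (titles.length % 6) "" := by
        have h6 : (pvDefaults.length : Int) = ((6 : Nat) : Int) := by simp [pvDefaults]
        rw [h6, PySem.Int.mod_natCast, PySem.List.pyGetD_natCast]
      rw [pvG_succ, h2]
      simp

theorem pvG_mod (m p : Nat) : pvG m (p % 6) = pvG m p := by
  unfold pvG
  refine List.map_congr_left (fun i _ => ?_)
  have h : (p % 6 + i) % 6 = (p + i) % 6 := by omega
  rw [h]

theorem pvG_add6 (m p : Nat) : pvG m (p + 6) = pvG m p := by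
  rw [← pvG_mod m (p + 6), show (p + 6) % 6 = p % 6 from by omega, pvG_mod]

theorem pvG_append (a b p : Nat) : pvG (a + b) p = pvG a p ++ pvG b (p + a) := by
  simp only [pvG, List.range_add, List.map_append, List.map_map]
  refine congrArg _ (List.map_congr_left (fun i _ => ?_))
  simp only [Function.comp]
  congr 2
  omega

theorem pvG_take (m M p : Nat) (h : m ≤ M) : (pvG M p).take m = pvG m p := by
  simp [pvG, ← List.map_take, List.take_range, Nat.min_eq_left h]

theorem pvRot_eq (off : Nat) (h : off < 6) :
    pvDefaults.drop off ++ pvDefaults.take off = pvG 6 off := by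
  interval_cases off <;> rfl

theorem pvFlatten_replicate (k p : Nat) :
    (List.replicate k (pvG 6 p)).flatten = pvG (6 * k) p := by
  induction k with
  | zero => simp [pvG]
  | succ k ih =>
      rw [List.replicate_succ, List.flatten_cons, ih]
      have h6 : 6 * (k + 1) = 6 + 6 * k := by omega
      rw [h6, pvG_append, pvG_add6]

theorem pvMain_eq (count : Int) (t : List String) :
    genTitlesLoopA count t =
      (if 0 < count - (t.length : Int) then
        t ++ PySem.List.slice
          ((List.replicate (PySem.Int.floordiv (count - (t.length : Int)) 6 + 1).toNat
            (PySem.List.slice pvDefaults (some (PySem.Int.mod (t.length : Int) 6)) none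
             ++ PySem.List.slice pvDefaults none (some (PySem.Int.mod (t.length : Int) 6)))).flatten)
          none (some (count - (t.length : Int)))
      else t) := by
  rw [loopA_eq]
  by_cases h : 0 < count - (t.length : Int)
  · rw [if_pos h]
    congr 1
    set n := t.length with hn
    set N := (count - (n : Int)).toNat with hN
    have hoff : PySem.Int.mod (n : Int) 6 = ((n % 6 : Nat) : Int) := by
      exact_mod_cast PySem.Int.mod_natCast n 6
    rw [hoff, PySem.List.slice_from_natCast, PySem.List.slice_to_natCast]
    have hneed : count - (n : Int) = ((N : Nat) : Int) := by omega
    rw [hneed, PySem.List.slice_to_natCast]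
    have hfd : PySem.Int.floordiv ((N : Nat) : Int) 6 = ((N / 6 : Nat) : Int) := by
      exact_mod_cast PySem.Int.floordiv_natCast N 6
    rw [hfd]
    have hk : (((N / 6 : Nat) : Int) + 1).toNat = N / 6 + 1 := by omega
    rw [hk, pvRot_eq (n % 6) (by omega), pvFlatten_replicate, pvG_mod,
       pvG_take N (6 * (N / 6 + 1)) n (by omega)]
  · rw [if_neg h]
    have : (count - (t.length : Int)).toNat = 0 := by omega
    simp [this, pvG]

-- ===== VERDICT (by name: the statement is the Claim_ definition above) =====
theorem generate_default_titles_py_spec : Claim_equal_generate_default_titles_py := by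
  intro count existing _
  unfold Spec_generate_default_titles_py generate_default_titles_py generate_default_titles_py_alt
  simp only []
  exact congrArg (fun xs => PySem.List.slice xs none (some count)) (pvMain_eq count _)
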